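-- pv_equiv track=rewrite | github.com/prathameshbonde/DeltaTest | tools/generate_dashboard.py | _group_tests
-- ===== SOURCE A (Python) =====
-- from typing import Any, Dict, List, Tuple
--
-- def _group_tests(selected_tests: List[str]) -> Dict[str, List[Tuple[str, str]]]:
--     """Group tests by class. Returns {class_fq: [(method, test_id), ...]} sorted by method."""
--     groups: Dict[str, List[Tuple[str, str]]] = {}
--     for tid in selected_tests:
--         class_fq, method = (tid.split("#", 1) + [""])[:2]
--         groups.setdefault(class_fq, []).append((method, tid))
--     # sort methods
--     for k in list(groups.keys()):
--         groups[k] = sorted(groups[k], key=lambda x: (x[0], x[1]))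
--     return dict(sorted(groups.items(), key=lambda x: x[0]))
-- ===== SOURCE B (Python) =====
-- from typing import Dict, List, Tuple
--
-- def _group_tests(selected_tests: List[str]) -> Dict[str, List[Tuple[str, str]]]:
--     """Group tests by class. Returns {class_fq: [(method, test_id), ...]} sorted by method."""
--     rows = [tuple((tid.split("#", 1) + [""])[:2]) + (tid,) for tid in selected_tests]
--     classes = sorted({c for c, _, _ in rows})
--     return {c: sorted((m, t) for c2, m, t in rows if c2 == c) for c in classes}
-- ===== Notes on version B (the rewrite author's own statement) =====
-- stated objective: alternative
-- what changed: Replaces A's dict-building (setdefault/append, per-key sort, sort of items) by a flat list of (class, method, tid) triples, a sorted set of classes, and a per-class filter-and-sort comprehension; no dict is mutated.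
import Mathlib
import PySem

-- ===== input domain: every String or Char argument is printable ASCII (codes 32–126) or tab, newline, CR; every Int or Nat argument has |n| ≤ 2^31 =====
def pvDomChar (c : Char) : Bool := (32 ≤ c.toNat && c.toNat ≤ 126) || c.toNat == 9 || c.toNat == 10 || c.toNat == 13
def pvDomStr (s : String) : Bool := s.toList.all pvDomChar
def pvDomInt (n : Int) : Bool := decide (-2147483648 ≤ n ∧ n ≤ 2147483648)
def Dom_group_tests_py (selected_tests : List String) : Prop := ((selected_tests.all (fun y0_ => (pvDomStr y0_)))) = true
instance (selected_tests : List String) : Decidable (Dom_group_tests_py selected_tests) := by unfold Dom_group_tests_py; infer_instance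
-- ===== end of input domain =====

-- B replaces A's dict mutation (setdefault/append, per-key re-sort, final sort of the items) by a
-- flat triple list, a sorted set of classes and a per-class filter-and-sort; equivalence proved on Dom.

-- ===== PORT A =====
-- shared parse helper for both Pythons' identical line: `(tid.split("#", 1) + [""])[:2]` unpacked
-- into (class_fq, method); split("#",1) always yields 1 or 2 pieces, so after appending "" the first
-- two exist (the final match arm is unreachable).
def pvSplitTid (tid : String) : String × String :=
  match (PySem.Str.splitMax? tid "#" 1).getD [] ++ [""] with
  | c :: m :: _ => (c, m)
  | _ => ("", "")

-- `groups.setdefault(class_fq, []).append((method, tid))` is `groups[k] = groups.get(k, []) + [(method, tid)]`,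
-- i.e. Dict.modify; the second loop reassigns `groups[k] = sorted(groups[k], key=...)` (insert keeps position).
def group_tests_py (selected_tests : List String) : List (String × List (String × String)) :=
  let groups : PySem.Dict String (List (String × String)) :=
    selected_tests.foldl (fun d tid =>
      d.modify (pvSplitTid tid).1 [] (fun v => v ++ [((pvSplitTid tid).2, tid)])) PySem.Dict.empty
  let groups2 := groups.keys.foldl (fun d k =>
      d.insert k (PySem.List.sorted2 (d.getD k []) (fun x => x.1) (fun x => x.2))) groups
  (PySem.Dict.ofList (PySem.List.sorted groups2.items (fun x => x.1))).items

-- ===== PORT B =====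
def group_tests_py_alt (selected_tests : List String) : List (String × List (String × String)) :=
  let rows := selected_tests.map (fun tid => ((pvSplitTid tid).1, (pvSplitTid tid).2, tid))
  let classes := PySem.List.sorted (PySem.Set.ofList (rows.map (fun r => r.1))) (fun c => c)
  classes.map (fun c =>
    (c, PySem.List.sorted2 ((rows.filter (fun r => r.1 == c)).map (fun r => (r.2.1, r.2.2)))
          (fun x => x.1) (fun x => x.2)))

-- ===== PRECONDITION & SPEC =====
def Spec_group_tests_py (selected_tests : List String) (out : List (String × List (String × String))) : Prop := out = group_tests_py_alt selected_tests
instance (selected_tests : List String) (out : List (String × List (String × String))) : Decidable (Spec_group_tests_py selected_tests out) := by unfold Spec_group_tests_py; infer_instance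

-- ===== CLAIM (what is proved, stated in full; the proofs are below) =====
def Claim_equal_group_tests_py : Prop := ∀ (selected_tests : List String), Dom_group_tests_py selected_tests → Spec_group_tests_py selected_tests (group_tests_py selected_tests)

-- ===== LEMMAS AND PROOFS =====

def pvF (tid : String) : String × (String × String) :=
  ((pvSplitTid tid).1, ((pvSplitTid tid).2, tid))

lemma pv_build_eq (sel : List String) :
    sel.foldl (fun d tid =>
      d.modify (pvSplitTid tid).1 [] (fun v => v ++ [((pvSplitTid tid).2, tid)])) PySem.Dict.empty
    = (sel.map pvF).foldl (fun d p => d.modify p.1 [] (fun v => v ++ [p.2])) PySem.Dict.empty := by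
  rw [List.foldl_map]; rfl

lemma pv_build_getD (sel : List String) (c : String) :
    (sel.foldl (fun d tid =>
      d.modify (pvSplitTid tid).1 [] (fun v => v ++ [((pvSplitTid tid).2, tid)])) PySem.Dict.empty).getD c []
    = ((sel.map pvF).filter (fun p => p.1 == c)).map (fun p => p.2) := by
  rw [pv_build_eq, PySem.Dict.getD_foldl_modify_append, PySem.Dict.getD_empty]
  simp

lemma pv_build_keys (sel : List String) :
    (sel.foldl (fun d tid =>
      d.modify (pvSplitTid tid).1 [] (fun v => v ++ [((pvSplitTid tid).2, tid)])) PySem.Dict.empty).keys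
    = PySem.Set.ofList (sel.map (fun tid => (pvSplitTid tid).1)) := by
  rw [pv_build_eq,
    PySem.Dict.keys_foldl_modify_key (sel.map pvF) Prod.fst [] (fun _ p v => v ++ [p.2]) PySem.Dict.empty,
    PySem.Dict.keys_empty, PySem.Set.update_nil_left, List.map_map]
  rfl

-- the per-key re-sorting loop, over distinct keys
lemma pv_sortloop_getD {ks : List String} (hnd : ks.Nodup)
    (d : PySem.Dict String (List (String × String))) (c : String) :
    (ks.foldl (fun d k =>
      d.insert k (PySem.List.sorted2 (d.getD k []) (fun x => x.1) (fun x => x.2))) d).getD c []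
    = if c ∈ ks then PySem.List.sorted2 (d.getD c []) (fun x => x.1) (fun x => x.2) else d.getD c [] := by
  induction ks generalizing d with
  | nil => simp
  | cons k t ih =>
    have hk : k ∉ t := (List.nodup_cons.mp hnd).1
    simp only [List.foldl_cons]
    rw [ih ((List.nodup_cons.mp hnd).2)]
    by_cases hct : c ∈ t
    · have hck : c ≠ k := fun h => hk (h ▸ hct)
      simp [hct, hck, PySem.Dict.getD_insert]
    · by_cases hck : c = k
      · subst hck; simp [hct]
      · simp [hct, hck, PySem.Dict.getD_insert]

lemma pv_sortloop_keys (ks : List String) (d : PySem.Dict String (List (String × String)))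
    (hsub : ∀ k ∈ ks, k ∈ d.keys) :
    (ks.foldl (fun d k =>
      d.insert k (PySem.List.sorted2 (d.getD k []) (fun x => x.1) (fun x => x.2))) d).keys = d.keys := by
  induction ks generalizing d with
  | nil => rfl
  | cons k t ih =>
    have hc : d.contains k = true :=
      (PySem.Dict.contains_iff_mem_keys d k).mpr (hsub k (List.mem_cons_self))
    have hkeys := PySem.Dict.keys_insert_of_contains d
      (PySem.List.sorted2 (d.getD k []) (fun x => x.1) (fun x => x.2)) hc
    simp only [List.foldl_cons]
    rw [ih _ (fun x hx => by rw [hkeys]; exact hsub x (List.mem_cons_of_mem _ hx)), hkeys]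

lemma pv_ofList_items {ν : Type} (l : List (String × ν)) (hnd : (l.map Prod.fst).Nodup) :
    (PySem.Dict.ofList l).items = l := by
  have h := PySem.Dict.items_foldl_insert_fresh l Prod.fst Prod.snd PySem.Dict.empty
    (fun a _ => by simp) hnd
  simpa [PySem.Dict.ofList, PySem.Dict.update] using h

-- the whole A-side pipeline, characterised
lemma pv_A_sorted_items (sel : List String) :
    PySem.List.sorted
      (((sel.foldl (fun d tid =>
          d.modify (pvSplitTid tid).1 [] (fun v => v ++ [((pvSplitTid tid).2, tid)])) PySem.Dict.empty).keys.foldl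
        (fun d k => d.insert k (PySem.List.sorted2 (d.getD k []) (fun x => x.1) (fun x => x.2)))
        (sel.foldl (fun d tid =>
          d.modify (pvSplitTid tid).1 [] (fun v => v ++ [((pvSplitTid tid).2, tid)])) PySem.Dict.empty)).items)
      (fun x => x.1)
    = (PySem.List.sorted (PySem.Set.ofList (sel.map (fun tid => (pvSplitTid tid).1))) (fun c => c)).map
        (fun c => (c, PySem.List.sorted2 (((sel.map pvF).filter (fun p => p.1 == c)).map (fun p => p.2))
          (fun x => x.1) (fun x => x.2))) := by
  have hK := pv_build_keys sel
  have hndK : (sel.foldl (fun d tid =>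
      d.modify (pvSplitTid tid).1 [] (fun v => v ++ [((pvSplitTid tid).2, tid)])) PySem.Dict.empty).keys.Nodup := by
    rw [hK]; exact PySem.Set.nodup_ofList _
  have hkeys2 := pv_sortloop_keys
    (sel.foldl (fun d tid =>
      d.modify (pvSplitTid tid).1 [] (fun v => v ++ [((pvSplitTid tid).2, tid)])) PySem.Dict.empty).keys
    (sel.foldl (fun d tid =>
      d.modify (pvSplitTid tid).1 [] (fun v => v ++ [((pvSplitTid tid).2, tid)])) PySem.Dict.empty)
    (fun _ hk => hk)
  have hitems : (((sel.foldl (fun d tid =>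
          d.modify (pvSplitTid tid).1 [] (fun v => v ++ [((pvSplitTid tid).2, tid)])) PySem.Dict.empty).keys.foldl
        (fun d k => d.insert k (PySem.List.sorted2 (d.getD k []) (fun x => x.1) (fun x => x.2)))
        (sel.foldl (fun d tid =>
          d.modify (pvSplitTid tid).1 [] (fun v => v ++ [((pvSplitTid tid).2, tid)])) PySem.Dict.empty)).items)
      = (PySem.Set.ofList (sel.map (fun tid => (pvSplitTid tid).1))).map
          (fun c => (c, PySem.List.sorted2 (((sel.map pvF).filter (fun p => p.1 == c)).map (fun p => p.2))
            (fun x => x.1) (fun x => x.2))) := by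
    rw [PySem.Dict.items_eq_map_keys _ (by rw [hkeys2]; exact hndK) [], hkeys2, hK]
    refine List.map_congr_left (fun c hc => ?_)
    rw [pv_sortloop_getD (PySem.Set.nodup_ofList _), if_pos hc, pv_build_getD]
  rw [hitems]
  apply PySem.List.sorted_eq_of_perm_of_pairwise_lt
  · exact (PySem.List.sorted_perm _ _ _).map _
  · exact (PySem.List.sorted_ofList_pairwise_lt _).map _ (fun a b h => h)

-- ===== VERDICT (by name: the statement is the Claim_ definition above) =====
theorem group_tests_py_spec : Claim_equal_group_tests_py := by
  intro sel _
  unfold Spec_group_tests_py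
  simp only [group_tests_py, group_tests_py_alt]
  have hrows : (sel.map (fun tid => ((pvSplitTid tid).1, (pvSplitTid tid).2, tid))).map (fun r => r.1)
      = sel.map (fun tid => (pvSplitTid tid).1) := by simp [Function.comp_def]
  rw [pv_A_sorted_items, hrows]
  rw [pv_ofList_items]
  · rfl
  · have hp := PySem.List.sorted_ofList_pairwise_lt (sel.map (fun tid => (pvSplitTid tid).1))
    have hmm : (((PySem.List.sorted (PySem.Set.ofList (sel.map (fun tid => (pvSplitTid tid).1))) (fun c => c)).map
        (fun c => (c, PySem.List.sorted2 (((sel.map pvF).filter (fun p => p.1 == c)).map (fun p => p.2))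
          (fun x => x.1) (fun x => x.2)))).map Prod.fst)
        = PySem.List.sorted (PySem.Set.ofList (sel.map (fun tid => (pvSplitTid tid).1))) (fun c => c) := by
      simp [Function.comp_def]
    rw [hmm]
    exact hp.imp (fun h => ne_of_lt h)
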